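-- pv_equiv track=rewrite | github.com/dolda2000/automanga | manga/local.py | decode1
-- ===== SOURCE A (Python) =====
-- def decode1(nm):
--     ret = []
--     p = 0
--     while p < len(nm):
--         if nm[p].isdigit():
--             s = p
--             p += 1
--             while p < len(nm) and nm[p].isdigit():
--                 p += 1
--             ret += [nm[s:p]]
--         elif nm[p].isalpha():
--             s = p
--             p += 1
--             while p < len(nm) and nm[p].isalpha():
--                 p += 1
--             ret += [nm[s:p]]
--         else:
--             ret += [nm[p]]
--             p += 1
--     return ret
-- ===== SOURCE B (Python) =====
-- def decode1(nm):
--     # single forward pass with a run accumulator instead of nested index scans (class change flushes; non-alphanumerics never merge)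
--     def cls(c):
--         return 0 if c.isdigit() else 1 if c.isalpha() else 2
--     ret = []
--     cur = ''
--     prev = None
--     for c in nm:
--         k = cls(c)
--         if k != 2 and k == prev:
--             cur += c
--         else:
--             if cur:
--                 ret.append(cur)
--             cur = c
--         prev = k
--     if cur:
--         ret.append(cur)
--     return ret
-- ===== Notes on version B (the rewrite author's own statement) =====
-- stated objective: alternative
-- what changed: Replaces A's index-based while loop with nested run-scanning inner loops and slicing by a single forward pass over the characters that maintains a current-run accumulator plus the class (digit/alpha/neither) of the previous character, flushing the run on every class change and never merging characters of the third class.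
import Mathlib
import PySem

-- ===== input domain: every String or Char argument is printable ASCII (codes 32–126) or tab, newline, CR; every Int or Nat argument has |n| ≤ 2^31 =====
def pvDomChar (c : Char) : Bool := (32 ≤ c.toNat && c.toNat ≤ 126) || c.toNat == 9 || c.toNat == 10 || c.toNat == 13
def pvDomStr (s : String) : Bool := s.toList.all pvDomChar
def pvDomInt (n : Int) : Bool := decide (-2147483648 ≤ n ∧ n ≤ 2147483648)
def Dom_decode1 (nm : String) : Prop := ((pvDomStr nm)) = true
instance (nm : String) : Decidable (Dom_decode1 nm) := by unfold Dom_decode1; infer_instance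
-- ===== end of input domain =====

-- B replaces A's nested index-scanning while loops by one forward pass with a run accumulator (objective: alternative decomposition, same cost).

-- ===== PORT A =====
-- inner `while p < len(nm) and nm[p].<pred>(): p += 1` scans (two identical copies in A, one per
-- predicate); the fuel argument only makes the loop structurally total (cs.length steps always suffice)
def pvScanWhile (pred : Char → Bool) (cs : List Char) : Nat → Nat → Nat
  | 0, p => p
  | fuel + 1, p =>
    if h : p < cs.length then
      if pred cs[p] then pvScanWhile pred cs fuel (p + 1) else p
    else p

-- the outer `while p < len(nm)` loop; nm[p] is the in-range index cs[p], nm[s:p] is PySem.List.slice;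
-- fuel (cs.length at the top call) only makes the loop structurally total
def decode1Loop (cs : List Char) : Nat → Nat → List String → List String
  | 0, _, ret => ret
  | fuel + 1, p, ret =>
    if h : p < cs.length then
      if PySem.Chars.isdigit cs[p] then
        let q := pvScanWhile PySem.Chars.isdigit cs cs.length (p + 1)
        decode1Loop cs fuel q (ret ++ [String.mk (PySem.List.slice cs (some (p : Int)) (some (q : Int)))])
      else if PySem.Chars.isalpha cs[p] then
        let q := pvScanWhile PySem.Chars.isalpha cs cs.length (p + 1)
        decode1Loop cs fuel q (ret ++ [String.mk (PySem.List.slice cs (some (p : Int)) (some (q : Int)))])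
      else
        decode1Loop cs fuel (p + 1) (ret ++ [String.mk [cs[p]]])
    else ret

def decode1 (nm : String) : List String := decode1Loop nm.toList nm.toList.length 0 []

-- ===== PORT B =====
-- `cls(c)`: 0 digit, 1 alpha, 2 other (digit checked first, as in Source B)
def pvCls (c : Char) : Nat :=
  if PySem.Chars.isdigit c then 0 else if PySem.Chars.isalpha c then 1 else 2

-- one iteration of Source B's for-loop; state = (ret, cur, prev)
def pvStep (st : List String × List Char × Option Nat) (c : Char) :
    List String × List Char × Option Nat :=
  let (ret, cur, prev) := st
  let k := pvCls c
  if k ≠ 2 ∧ prev = some k then (ret, cur ++ [c], some k)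
  else ((if cur = [] then ret else ret ++ [String.mk cur]), [c], some k)

def decode1_alt (nm : String) : List String :=
  let (ret, cur, _) := nm.toList.foldl pvStep ([], [], none)
  if cur = [] then ret else ret ++ [String.mk cur]

-- ===== PRECONDITION & SPEC =====
def Spec_decode1 (nm : String) (out : List String) : Prop := out = decode1_alt nm
instance (nm : String) (out : List String) : Decidable (Spec_decode1 nm out) := by unfold Spec_decode1; infer_instance

-- ===== CLAIM (what is proved, stated in full; the proofs are below) =====
def Claim_equal_decode1 : Prop := ∀ (nm : String), Dom_decode1 nm → Spec_decode1 nm (decode1 nm)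

-- ===== LEMMAS AND PROOFS =====

-- no character is both a digit and a letter (PySem predicates)
theorem pvDigit_not_alpha (c : Char) (h : PySem.Chars.isdigit c = true) :
    PySem.Chars.isalpha c = false := by
  simp only [PySem.Chars.isdigit, PySem.Chars.isalpha, PySem.Chars.isupper, PySem.Chars.islower,
    Bool.and_eq_true, decide_eq_true_eq, Bool.or_eq_false_iff, Bool.and_eq_false_iff,
    decide_eq_false_iff_not, Char.le_def, UInt32.le_iff_toNat_le] at *
  have h0 : ('0' : Char).val.toNat = 48 := by decide
  have h9 : ('9' : Char).val.toNat = 57 := by decide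
  have hA : ('A' : Char).val.toNat = 65 := by decide
  have hZ : ('Z' : Char).val.toNat = 90 := by decide
  have ha : ('a' : Char).val.toNat = 97 := by decide
  have hz : ('z' : Char).val.toNat = 122 := by decide
  omega

-- canonical run decomposition both ports are reduced to
def pvRuns : List Char → List String
  | [] => []
  | c :: rest =>
    if PySem.Chars.isdigit c then
      String.mk (c :: rest.takeWhile PySem.Chars.isdigit) :: pvRuns (rest.dropWhile PySem.Chars.isdigit)
    else if PySem.Chars.isalpha c then
      String.mk (c :: rest.takeWhile PySem.Chars.isalpha) :: pvRuns (rest.dropWhile PySem.Chars.isalpha)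
    else String.mk [c] :: pvRuns rest
termination_by cs => cs.length
decreasing_by
  · exact Nat.lt_succ_of_le (List.length_dropWhile_le _ _)
  · exact Nat.lt_succ_of_le (List.length_dropWhile_le _ _)
  · exact Nat.lt_succ_self _

theorem pvTake_len_takeWhile (l : List Char) (p : Char → Bool) :
    l.take (l.takeWhile p).length = l.takeWhile p := by
  induction l with
  | nil => simp
  | cons c t ih =>
    by_cases hc : p c
    · rw [List.takeWhile_cons_of_pos hc]; simp [ih]
    · rw [List.takeWhile_cons_of_neg (by simp [hc])]; simp

theorem pvDrop_len_takeWhile (l : List Char) (p : Char → Bool) :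
    l.drop (l.takeWhile p).length = l.dropWhile p := by
  induction l with
  | nil => simp
  | cons c t ih =>
    by_cases hc : p c
    · rw [List.takeWhile_cons_of_pos hc, List.dropWhile_cons_of_pos hc]; simpa using ih
    · rw [List.takeWhile_cons_of_neg (by simp [hc]), List.dropWhile_cons_of_neg (by simp [hc])]
      simp

theorem pvScanWhile_eq (pred : Char → Bool) (cs : List Char) :
    ∀ (fuel p : Nat), cs.length ≤ p + fuel →
    pvScanWhile pred cs fuel p = p + ((cs.drop p).takeWhile pred).length := by
  intro fuel
  induction fuel with
  | zero =>
    intro p hp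
    rw [pvScanWhile, List.drop_eq_nil_of_le (by omega)]
    simp
  | succ fuel ih =>
    intro p hp
    rw [pvScanWhile]
    split
    · rename_i h
      rw [List.drop_eq_getElem_cons h]
      split
      · rename_i hpred
        rw [ih (p + 1) (by omega), List.takeWhile_cons_of_pos hpred]
        simp; omega
      · rename_i hpred
        rw [List.takeWhile_cons_of_neg hpred]
        simp
    · rename_i h
      rw [List.drop_eq_nil_of_le (by omega)]
      simp

-- A's outer loop produces the canonical runs of the unprocessed suffix
theorem pvLoop_eq_runs (cs : List Char) :
    ∀ (fuel p : Nat) (ret : List String), cs.length ≤ p + fuel →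
    decode1Loop cs fuel p ret = ret ++ pvRuns (cs.drop p) := by
  intro fuel
  induction fuel with
  | zero =>
    intro p ret hp
    rw [decode1Loop, List.drop_eq_nil_of_le (by omega)]
    simp [pvRuns]
  | succ fuel ih =>
    intro p ret hp
    rw [decode1Loop]
    split
    · rename_i h
      by_cases hd : PySem.Chars.isdigit cs[p]
      · rw [if_pos hd]
        simp only
        rw [pvScanWhile_eq PySem.Chars.isdigit cs cs.length (p + 1) (by omega)]
        rw [ih _ _ (by omega)]
        rw [PySem.List.slice_natCast]
        rw [show p + 1 + ((cs.drop (p + 1)).takeWhile PySem.Chars.isdigit).length - p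
              = ((cs.drop (p + 1)).takeWhile PySem.Chars.isdigit).length + 1 from by omega]
        rw [List.drop_eq_getElem_cons h, List.take_succ_cons, pvTake_len_takeWhile]
        rw [show List.drop (p + 1 + ((cs.drop (p + 1)).takeWhile PySem.Chars.isdigit).length) cs
              = List.drop ((cs.drop (p + 1)).takeWhile PySem.Chars.isdigit).length (List.drop (p + 1) cs)
            from List.drop_drop.symm]
        rw [pvDrop_len_takeWhile]
        rw [pvRuns, if_pos hd]
        simp
      · rw [if_neg hd]
        by_cases ha : PySem.Chars.isalpha cs[p]
        · rw [if_pos ha]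
          simp only
          rw [pvScanWhile_eq PySem.Chars.isalpha cs cs.length (p + 1) (by omega)]
          rw [ih _ _ (by omega)]
          rw [PySem.List.slice_natCast]
          rw [show p + 1 + ((cs.drop (p + 1)).takeWhile PySem.Chars.isalpha).length - p
                = ((cs.drop (p + 1)).takeWhile PySem.Chars.isalpha).length + 1 from by omega]
          rw [List.drop_eq_getElem_cons h, List.take_succ_cons, pvTake_len_takeWhile]
          rw [show List.drop (p + 1 + ((cs.drop (p + 1)).takeWhile PySem.Chars.isalpha).length) cs
                = List.drop ((cs.drop (p + 1)).takeWhile PySem.Chars.isalpha).length (List.drop (p + 1) cs)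
              from List.drop_drop.symm]
          rw [pvDrop_len_takeWhile]
          rw [pvRuns, if_neg (by simp [hd]), if_pos ha]
          simp
        · rw [if_neg ha]
          rw [ih _ _ (by omega)]
          rw [List.drop_eq_getElem_cons h, pvRuns, if_neg (by simp [hd]), if_neg (by simp [ha])]
          simp
    · rename_i h
      rw [List.drop_eq_nil_of_le (by omega)]
      simp [pvRuns]

-- the class-k membership tests coincide with A's run predicates
theorem pvCls_eq_zero : (fun x => pvCls x == 0) = PySem.Chars.isdigit := by
  funext x
  by_cases h : PySem.Chars.isdigit x <;> simp [pvCls, h]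
  split <;> simp

theorem pvCls_eq_one : (fun x => pvCls x == 1) = PySem.Chars.isalpha := by
  funext x
  by_cases h : PySem.Chars.isdigit x
  · simp [pvCls, h, pvDigit_not_alpha x h]
  · by_cases ha : PySem.Chars.isalpha x <;> simp [pvCls, h, ha]

-- pvRuns restated through pvCls
theorem pvRuns_cons (c : Char) (rest : List Char) :
    pvRuns (c :: rest) =
      if pvCls c = 2 then String.mk [c] :: pvRuns rest
      else String.mk (c :: rest.takeWhile (fun x => pvCls x == pvCls c)) ::
             pvRuns (rest.dropWhile (fun x => pvCls x == pvCls c)) := by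
  by_cases hd : PySem.Chars.isdigit c
  · have hc : pvCls c = 0 := by simp [pvCls, hd]
    rw [pvRuns, if_pos hd, if_neg (by omega)]
    rw [hc, pvCls_eq_zero]
  · by_cases ha : PySem.Chars.isalpha c
    · have hc : pvCls c = 1 := by simp [pvCls, hd, ha]
      rw [pvRuns, if_neg (by simp [hd]), if_pos ha, if_neg (by omega)]
      rw [hc, pvCls_eq_one]
    · have hc : pvCls c = 2 := by simp [pvCls, hd, ha]
      rw [pvRuns, if_neg (by simp [hd]), if_neg (by simp [ha]), if_pos hc]

def pvFinish (st : List String × List Char × Option Nat) : List String :=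
  let (ret, cur, _) := st
  if cur = [] then ret else ret ++ [String.mk cur]

-- invariant of B's fold: mid-run state (ret, cur, some k) with cur ≠ []
theorem pvFold_eq (cs : List Char) : ∀ (ret : List String) (cur : List Char) (k : Nat),
    cur ≠ [] →
    pvFinish (cs.foldl pvStep (ret, cur, some k)) =
      if k = 2 then ret ++ String.mk cur :: pvRuns cs
      else ret ++ [String.mk (cur ++ cs.takeWhile (fun x => pvCls x == k))] ++
             pvRuns (cs.dropWhile (fun x => pvCls x == k)) := by
  induction cs with
  | nil =>
    intro ret cur k hcur
    simp [pvFinish, hcur, pvRuns]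
  | cons c rest ih =>
    intro ret cur k hcur
    rw [List.foldl_cons]
    by_cases hm : pvCls c ≠ 2 ∧ (some k : Option Nat) = some (pvCls c)
    · have hk : k = pvCls c := by injection hm.2
      rw [show pvStep (ret, cur, some k) c = (ret, cur ++ [c], some (pvCls c)) from by
        simp [pvStep, hm.1, hm.2]]
      rw [ih ret (cur ++ [c]) (pvCls c) (by simp)]
      rw [if_neg hm.1, hk]
      rw [if_neg hm.1]
      rw [List.takeWhile_cons_of_pos (by simp), List.dropWhile_cons_of_pos (by simp)]
      simp
    · rw [show pvStep (ret, cur, some k) c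
            = (ret ++ [String.mk cur], [c], some (pvCls c)) from by
        simp [pvStep, hcur]
        intro h1 h2
        exact absurd ⟨h1, by rw [h2]⟩ hm]
      rw [ih (ret ++ [String.mk cur]) [c] (pvCls c) (by simp)]
      have hrhs : (if pvCls c = 2 then ret ++ [String.mk cur] ++ String.mk [c] :: pvRuns rest
          else ret ++ [String.mk cur] ++ [String.mk ([c] ++ rest.takeWhile (fun x => pvCls x == pvCls c))] ++
            pvRuns (rest.dropWhile (fun x => pvCls x == pvCls c)))
          = ret ++ String.mk cur :: pvRuns (c :: rest) := by
        rw [pvRuns_cons]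
        split <;> simp
      rw [hrhs]
      by_cases hk2 : k = 2
      · rw [if_pos hk2]
      · rw [if_neg hk2]
        have hne : (pvCls c == k) = false := by
          simp
          intro h
          exact hm ⟨by omega, by rw [h]⟩
        rw [List.takeWhile_cons_of_neg (by simp [hne]), List.dropWhile_cons_of_neg (by simp [hne])]
        simp

-- B computes the canonical runs
theorem pvAlt_eq_runs (nm : String) : decode1_alt nm = pvRuns nm.toList := by
  unfold decode1_alt
  cases h : nm.toList with
  | nil => simp [pvRuns]
  | cons c rest =>
    rw [List.foldl_cons]
    rw [show pvStep ([], [], none) c = ([], [c], some (pvCls c)) from by simp [pvStep]]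
    have := pvFold_eq rest [] [c] (pvCls c) (by simp)
    unfold pvFinish at this
    rw [pvRuns_cons]
    by_cases hc : pvCls c = 2
    · rw [if_pos hc]
      rw [if_pos hc] at this
      exact (by simpa using this)
    · rw [if_neg hc]
      rw [if_neg hc] at this
      exact (by simpa using this)

-- ===== VERDICT (by name: the statement is the Claim_ definition above) =====
theorem decode1_spec : Claim_equal_decode1 := by
  intro nm _
  unfold Spec_decode1
  rw [pvAlt_eq_runs, decode1, pvLoop_eq_runs nm.toList nm.toList.length 0 [] (by omega)]
  simp
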